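-- pv_equiv track=rewrite | github.com/mirusu400/HM_SOS_TOT | extract.py | check_encoding
-- ===== SOURCE A (Python) =====
-- def check_encoding(btext):
--     count = 0
--     for char in btext:
--         if int(char) == 0x0:
--             count += 1
--             continue
--         if int(char) >= 0x30 and int(char) <= 0x7E:
--             continue
--         else:
--             return "utf-16"
--     if count >= 5:
--         return "utf-16"
--     return "ascii"
-- ===== SOURCE B (Python) =====
-- def check_encoding(btext):
--     if any(int(c) != 0 and not (0x30 <= int(c) <= 0x7E) for c in btext):
--         return "utf-16"
--     if sum(1 for c in btext if int(c) == 0) >= 5: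
--         return "utf-16"
--     return "ascii"
-- ===== Notes on version B (the rewrite author's own statement) =====
-- stated objective: alternative
-- what changed: Replaced the single fused scan-and-count loop carrying a mutable zero counter with two separate passes: a short-circuiting any() scan for a byte that is neither zero nor printable-digit-to-tilde, then an independent count of the zero bytes.
import Mathlib
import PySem

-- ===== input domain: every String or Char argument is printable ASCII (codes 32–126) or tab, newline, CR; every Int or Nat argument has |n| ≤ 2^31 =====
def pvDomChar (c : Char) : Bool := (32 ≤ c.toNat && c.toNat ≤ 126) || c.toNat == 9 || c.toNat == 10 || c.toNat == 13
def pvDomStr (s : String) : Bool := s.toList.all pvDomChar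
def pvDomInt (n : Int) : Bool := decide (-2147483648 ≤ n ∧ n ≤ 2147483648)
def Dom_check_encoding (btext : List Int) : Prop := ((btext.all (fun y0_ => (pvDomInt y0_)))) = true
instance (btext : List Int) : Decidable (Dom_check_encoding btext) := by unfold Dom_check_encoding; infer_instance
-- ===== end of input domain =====

-- ===== PORT A =====
-- B replaces A's fused counting loop with two independent passes (any-scan + zero count); same O(n) cost (alternative decomposition).
-- Port of A's loop: count carried through the scan, early return on a bad byte.
def check_encoding_loop : List Int → Int → String
  | [], count => if count ≥ 5 then "utf-16" else "ascii"
  | c :: rest, count =>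
    if c = 0 then check_encoding_loop rest (count + 1)
    else if c ≥ 0x30 ∧ c ≤ 0x7E then check_encoding_loop rest count
    else "utf-16"

def check_encoding (btext : List Int) : String := check_encoding_loop btext 0

-- ===== PORT B =====
def check_encoding_alt (btext : List Int) : String :=
  if btext.any (fun c => decide (c ≠ 0 ∧ ¬ (0x30 ≤ c ∧ c ≤ 0x7E))) then "utf-16"
  else if ((btext.filter (fun c => decide (c = 0))).map (fun _ => (1 : Int))).sum ≥ 5 then "utf-16"
  else "ascii"

-- ===== PRECONDITION & SPEC =====
def Spec_check_encoding (btext : List Int) (out : String) : Prop := out = check_encoding_alt btext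
instance (btext : List Int) (out : String) : Decidable (Spec_check_encoding btext out) := by unfold Spec_check_encoding; infer_instance

-- ===== CLAIM (what is proved, stated in full; the proofs are below) =====
def Claim_equal_check_encoding : Prop := ∀ (btext : List Int), Dom_check_encoding btext → Spec_check_encoding btext (check_encoding btext)

-- ===== LEMMAS AND PROOFS =====

-- ===== VERDICT (by name: the statement is the Claim_ definition above) =====
-- Loop characterisation: A's fused loop equals B's two-pass formulation, for any carried count.
theorem check_encoding_loop_eq (l : List Int) (count : Int) :
    check_encoding_loop l count =
      (if l.any (fun c => decide (c ≠ 0 ∧ ¬ (0x30 ≤ c ∧ c ≤ 0x7E))) then "utf-16"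
       else if count + ((l.filter (fun c => decide (c = 0))).map (fun _ => (1 : Int))).sum ≥ 5 then "utf-16"
       else "ascii") := by
  induction l generalizing count with
  | nil => simp [check_encoding_loop]
  | cons c rest ih =>
    by_cases h0 : c = 0
    · rw [show check_encoding_loop (c :: rest) count = check_encoding_loop rest (count + 1) by
        simp [check_encoding_loop, h0], ih]
      subst h0
      rw [show ((0:Int) :: rest).any (fun c => decide (c ≠ 0 ∧ ¬ (48 ≤ c ∧ c ≤ 126)))
            = rest.any (fun c => decide (c ≠ 0 ∧ ¬ (48 ≤ c ∧ c ≤ 126))) by simp,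
        show (((0:Int) :: rest).filter (fun c => decide (c = 0)))
            = (0 :: rest.filter (fun c => decide (c = 0))) by simp,
        List.map_cons, List.sum_cons, ← add_assoc]
    · by_cases hr : (0x30:Int) ≤ c ∧ c ≤ 0x7E
      · rw [show check_encoding_loop (c :: rest) count = check_encoding_loop rest count by
          simp [check_encoding_loop, h0, hr], ih]
        rw [show ((c :: rest).any (fun c => decide (c ≠ 0 ∧ ¬ (48 ≤ c ∧ c ≤ 126))))
              = rest.any (fun c => decide (c ≠ 0 ∧ ¬ (48 ≤ c ∧ c ≤ 126))) by simp [hr],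
          show ((c :: rest).filter (fun c => decide (c = 0)))
              = rest.filter (fun c => decide (c = 0)) by simp [h0]]
      · rw [show check_encoding_loop (c :: rest) count = "utf-16" by
          simp [check_encoding_loop, h0, hr],
          if_pos (by simp only [List.any_cons, Bool.or_eq_true, decide_eq_true_eq]
                     exact Or.inl ⟨h0, hr⟩)]

theorem check_encoding_spec : Claim_equal_check_encoding := by
  intro btext _
  unfold Spec_check_encoding check_encoding check_encoding_alt
  rw [check_encoding_loop_eq]
  simp
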